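-- pv_equiv track=rewrite | github.com/haxzh/Locaa-AI | backend/core/translation.py | _protect_terms
-- ===== SOURCE A (Python) =====
-- PROTECTED_TERMS = [
--     'Locaa AI',
--     'YouTube',
--     'Instagram',
--     'TikTok',
--     'Reels',
--     'Shorts'
-- ]
--
-- def _protect_terms(text: str):
--     mapping = {}
--     protected = text
--     for i, term in enumerate(PROTECTED_TERMS):
--         token = f"__TERM_{i}__"
--         mapping[token] = term
--         protected = protected.replace(term, token)
--     return protected, mapping
-- ===== SOURCE B (Python) =====
-- import re
--
-- PROTECTED_TERMS = [
--     'Locaa AI',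
--     'YouTube',
--     'Instagram',
--     'TikTok',
--     'Reels',
--     'Shorts'
-- ]
--
-- _TOKEN_OF = {term: f"__TERM_{i}__" for i, term in enumerate(PROTECTED_TERMS)}
-- _PATTERN = re.compile("|".join(re.escape(t) for t in PROTECTED_TERMS))
--
-- def _protect_terms(text: str):
--     mapping = {f"__TERM_{i}__": term for i, term in enumerate(PROTECTED_TERMS)}
--     protected = _PATTERN.sub(lambda m: _TOKEN_OF[m.group(0)], text)
--     return protected, mapping
-- ===== Notes on version B (the rewrite author's own statement) =====
-- stated objective: alternative
-- what changed: A runs six sequential whole-string str.replace passes; B precomputes the full token mapping up front and replaces all protected terms in one single left-to-right pass via a compiled regex alternation with a callback.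
import Mathlib
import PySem

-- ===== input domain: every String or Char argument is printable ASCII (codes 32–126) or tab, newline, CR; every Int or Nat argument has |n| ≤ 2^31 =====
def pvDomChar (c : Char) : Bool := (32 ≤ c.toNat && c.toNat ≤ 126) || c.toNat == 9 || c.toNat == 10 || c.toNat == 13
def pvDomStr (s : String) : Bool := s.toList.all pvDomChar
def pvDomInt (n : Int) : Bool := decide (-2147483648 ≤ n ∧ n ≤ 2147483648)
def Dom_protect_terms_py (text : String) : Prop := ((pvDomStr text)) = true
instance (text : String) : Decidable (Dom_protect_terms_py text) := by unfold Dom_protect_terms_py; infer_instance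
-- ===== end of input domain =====

-- B replaces A's six sequential str.replace passes by one single left-to-right pass (the
-- port of Source B's compiled regex alternation) plus an up-front mapping: an alternative
-- single-scan algorithm. Return-value equivalence only (neither version mutates anything).

-- ===== PORT A =====
def pvProtectedTerms : List String :=
  ["Locaa AI", "YouTube", "Instagram", "TikTok", "Reels", "Shorts"]

def protect_terms_py (text : String) : String × (List (String × String)) :=
  -- mapping = {}; protected = text; for i, term in enumerate(PROTECTED_TERMS): ...
  let r := (PySem.List.enumerate pvProtectedTerms).foldl
    (fun (st : PySem.Dict String String × String) (p : Int × String) =>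
      let token := "__TERM_" ++ PySem.Int.toStr p.1 ++ "__"
      (st.1.insert token p.2, PySem.Str.replace st.2 p.2 token))
    (PySem.Dict.empty, text)
  (r.2, r.1.items)

-- ===== PORT B =====
-- Source B's module constant _PATTERN (regex alternation of the literal terms, in list order)
-- together with the _TOKEN_OF lookup the sub-callback does: the pair list (term chars, token chars).
def pvPairs : List (List Char × List Char) :=
  (PySem.List.enumerate pvProtectedTerms).map
    (fun p => (p.2.toList, ("__TERM_" ++ PySem.Int.toStr p.1 ++ "__").toList))

-- Hand port of _PATTERN.sub over this fixed alternation of literal terms (exact here: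
-- re.sub scans left to right; at each position the first alternative that matches wins,
-- and the callback emits that term's token): fuel = remaining length.
def pvScanGo (ps : List (List Char × List Char)) : Nat → List Char → List Char
  | _, [] => []
  | 0, l => l
  | fuel + 1, c :: t =>
    match ps.find? (fun p => p.1.isPrefixOf (c :: t)) with
    | some pr => pr.2 ++ pvScanGo ps fuel ((c :: t).drop pr.1.length)
    | none => c :: pvScanGo ps fuel t

def protect_terms_py_alt (text : String) : String × (List (String × String)) :=
  -- mapping = {f"__TERM_{i}__": term for i, term in enumerate(PROTECTED_TERMS)} (keys distinct)
  let mapping := (PySem.List.enumerate pvProtectedTerms).map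
    (fun p => ("__TERM_" ++ PySem.Int.toStr p.1 ++ "__", p.2))
  (String.ofList (pvScanGo pvPairs text.toList.length text.toList), mapping)

-- ===== PRECONDITION & SPEC =====
def Spec_protect_terms_py (text : String) (out : String × (List (String × String))) : Prop := out = protect_terms_py_alt text
instance (text : String) (out : String × (List (String × String))) : Decidable (Spec_protect_terms_py text out) := by unfold Spec_protect_terms_py; infer_instance

-- ===== CLAIM (what is proved, stated in full; the proofs are below) =====
def Claim_equal_protect_terms_py : Prop := ∀ (text : String), Dom_protect_terms_py text → Spec_protect_terms_py text (protect_terms_py text)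

-- ===== LEMMAS AND PROOFS =====

-- A clean (fuel-free) model of one str.replace pass, at the char-list level.
def pvScan1 (old nw : List Char) : List Char → List Char
  | [] => []
  | c :: t =>
    if old.isPrefixOf (c :: t) then nw ++ pvScan1 old nw (t.drop (old.length - 1))
    else c :: pvScan1 old nw t
termination_by l => l.length
decreasing_by
  · simp only [List.length_cons]
    have : (t.drop (old.length - 1)).length ≤ t.length := by
      simp [List.length_drop]
    omega
  · simp

-- the sequential-replace composition, over a pair list
def pvSeq (ps : List (List Char × List Char)) (s : List Char) : List Char :=
  ps.foldl (fun acc p => pvScan1 p.1 p.2 acc) s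

theorem pvScan1_nil (old nw : List Char) : pvScan1 old nw [] = [] := by
  simp [pvScan1]

theorem pvScan1_neg (old nw : List Char) (c : Char) (t : List Char)
    (h : ¬ old <+: (c :: t)) : pvScan1 old nw (c :: t) = c :: pvScan1 old nw t := by
  rw [pvScan1]
  simp [List.isPrefixOf_iff_prefix, h]

theorem pvScan1_pos (old nw : List Char) (s : List Char) (hne : old ≠ [])
    (h : old <+: s) : pvScan1 old nw s = nw ++ pvScan1 old nw (s.drop old.length) := by
  obtain ⟨c0, t0, rfl⟩ : ∃ c0 t0, old = c0 :: t0 := by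
    cases old with
    | nil => exact absurd rfl hne
    | cons a b => exact ⟨a, b, rfl⟩
  obtain ⟨rest, hrest⟩ := h
  cases s with
  | nil => simp at hrest
  | cons c t =>
    rw [pvScan1]
    have hp : (c0 :: t0).isPrefixOf (c :: t) = true := by
      rw [List.isPrefixOf_iff_prefix]; exact ⟨rest, hrest⟩
    simp only [hp, if_pos]
    have : t.drop (c0 :: t0).length.pred = (c :: t).drop (c0 :: t0).length := by
      simp [List.length_cons]
    simp only [List.length_cons] at *
    congr 1

theorem pvReplace_go_eq (old nw : List Char) (hne : old ≠ []) :
    ∀ fuel l acc, l.length ≤ fuel →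
      PySem.Chars.replace.go old nw fuel l acc = acc.reverse ++ pvScan1 old nw l := by
  intro fuel
  induction fuel with
  | zero =>
    intro l acc hl
    have : l = [] := List.eq_nil_of_length_eq_zero (Nat.le_zero.mp hl)
    subst this
    simp [PySem.Chars.replace.go, pvScan1_nil]
  | succ f ih =>
    intro l acc hl
    cases l with
    | nil => simp [PySem.Chars.replace.go, pvScan1_nil]
    | cons c t =>
      rw [PySem.Chars.replace.go]
      by_cases hp : old <+: (c :: t)
      · have hb : old.isPrefixOf (c :: t) = true := List.isPrefixOf_iff_prefix.mpr hp
        simp only [hb, if_pos]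
        have h1 : 1 ≤ old.length := by
          cases h : old with
          | nil => exact absurd h hne
          | cons a b => exact Nat.succ_le_succ (Nat.zero_le _)
        rw [ih _ _ (by simp at hl ⊢; omega), pvScan1_pos old nw _ hne hp]
        simp
      · have hb : old.isPrefixOf (c :: t) = false := by
          rw [Bool.eq_false_iff]; intro hc; exact hp (List.isPrefixOf_iff_prefix.mp hc)
        simp only [hb, Bool.false_eq_true, if_false]
        rw [ih _ _ (by simp at hl ⊢; omega), pvScan1_neg old nw c t hp]
        simp

theorem pvReplace_eq_scan1 (s old nw : List Char) (hne : old ≠ []) :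
    PySem.Chars.replace s old nw = pvScan1 old nw s := by
  rw [PySem.Chars.replace]
  have : old.isEmpty = false := by cases old <;> simp_all
  rw [this]
  simp only [Bool.false_eq_true, if_false]
  rw [pvReplace_go_eq old nw hne s.length s [] (le_refl _)]
  simp

-- prefix transfer: a '_'-free word that is a prefix of a replaced string was already a
-- prefix of the original (tokens begin with '_').
theorem pvPT (u : List Char) (k : List Char) (hu : u ≠ []) (hk : ∃ k', k = '_' :: k') :
    ∀ n s v, s.length = n → ('_' ∉ v) → v <+: pvScan1 u k s → v <+: s := by
  intro n
  induction n using Nat.strong_induction_on with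
  | _ n ih =>
    intro s v hlen hv hpre
    cases s with
    | nil =>
      rw [pvScan1_nil] at hpre
      have := List.prefix_nil.mp hpre
      subst this
      exact List.nil_prefix
    | cons c t =>
      by_cases hp : u <+: (c :: t)
      · rw [pvScan1_pos u k _ hu hp] at hpre
        obtain ⟨k', rfl⟩ := hk
        cases v with
        | nil => exact List.nil_prefix
        | cons d v' =>
          rw [List.cons_append, List.cons_prefix_cons] at hpre
          exact absurd (hpre.1 ▸ List.mem_cons_self) hv
      · rw [pvScan1_neg u k c t hp] at hpre
        cases v with
        | nil => exact List.nil_prefix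
        | cons d v' =>
          rw [List.cons_prefix_cons] at hpre ⊢
          refine ⟨hpre.1, ?_⟩
          exact ih t.length (by simp [← hlen]) t v' rfl
            (fun hm => hv (List.mem_cons_of_mem _ hm)) hpre.2

theorem pvPT' (u : List Char) (k : List Char) (hu : u ≠ []) (hk : ∃ k', k = '_' :: k')
    (s v : List Char) (hv : '_' ∉ v) (hpre : v <+: pvScan1 u k s) : v <+: s :=
  pvPT u k hu hk s.length s v rfl hv hpre

-- goodness of a pair list: nonempty '_'-free terms, tokens starting with '_'
def pvGood (ps : List (List Char × List Char)) : Prop :=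
  ∀ p ∈ ps, p.1 ≠ [] ∧ ('_' ∉ p.1) ∧ p.2.head? = some '_'

theorem pvGood_tok {ps : List (List Char × List Char)} {p : List Char × List Char}
    (hg : pvGood ps) (hp : p ∈ ps) : ∃ k', p.2 = '_' :: k' := by
  obtain ⟨_, _, hh⟩ := hg p hp
  obtain ⟨t, ht⟩ := List.head?_eq_some_iff.mp hh
  exact ⟨t, ht⟩

theorem pvGood_sub {ps qs : List (List Char × List Char)} (h : ∀ p ∈ ps, p ∈ qs)
    (hg : pvGood qs) : pvGood ps := fun p hp => hg p (h p hp)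

theorem pvSeq_nil (ps : List (List Char × List Char)) : pvSeq ps [] = [] := by
  induction ps with
  | nil => rfl
  | cons q ps ih =>
    show pvSeq ps (pvScan1 q.1 q.2 []) = []
    rw [pvScan1_nil]; exact ih

theorem pvSeq_cons (q : List Char × List Char) (ps : List (List Char × List Char))
    (s : List Char) : pvSeq (q :: ps) s = pvSeq ps (pvScan1 q.1 q.2 s) := rfl

theorem pvSeq_append (ps qs : List (List Char × List Char)) (s : List Char) :
    pvSeq (ps ++ qs) s = pvSeq qs (pvSeq ps s) := by
  simp [pvSeq, List.foldl_append]

-- if no term matches at the head, the whole composition steps over the head char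
theorem pvSeqHead (ps : List (List Char × List Char)) (hg : pvGood ps) :
    ∀ s c, (∀ p ∈ ps, ¬ p.1 <+: (c :: s)) → pvSeq ps (c :: s) = c :: pvSeq ps s := by
  induction ps with
  | nil => intro s c _; rfl
  | cons q ps ih =>
    intro s c hno
    obtain ⟨hne, hnoU, _⟩ := hg q List.mem_cons_self
    have hk := pvGood_tok hg (List.mem_cons_self (l := ps))
    have hg' : pvGood ps := pvGood_sub (fun p hp => List.mem_cons_of_mem _ hp) hg
    rw [pvSeq_cons, pvScan1_neg q.1 q.2 c s (hno q List.mem_cons_self), pvSeq_cons]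
    refine ih hg' (pvScan1 q.1 q.2 s) c ?_
    intro p hp hpre
    obtain ⟨pne, pnoU, _⟩ := hg' p hp
    obtain ⟨d, v', hdv⟩ : ∃ d v', p.1 = d :: v' := by
      cases h : p.1 with
      | nil => exact absurd h pne
      | cons a b => exact ⟨a, b, rfl⟩
    rw [hdv, List.cons_prefix_cons] at hpre
    rw [hdv] at pnoU
    have : v' <+: s := pvPT' q.1 q.2 hne hk s v'
      (fun hm => pnoU (List.mem_cons_of_mem _ hm)) hpre.2
    exact hno p (List.mem_cons_of_mem _ hp)
      (by rw [hdv, hpre.1]; exact List.cons_prefix_cons.mpr ⟨rfl, this⟩)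

-- if no term matches strictly before position m, the composition splits at m
theorem pvSplitSeq (ps : List (List Char × List Char)) (hg : pvGood ps) :
    ∀ m s, m ≤ s.length → (∀ p ∈ ps, ∀ q < m, ¬ p.1 <+: s.drop q) →
      pvSeq ps s = s.take m ++ pvSeq ps (s.drop m) := by
  intro m
  induction m with
  | zero => intro s _ _; simp
  | succ m ih =>
    intro s hm hno
    cases s with
    | nil => simp at hm
    | cons c t =>
      have h0 : ∀ p ∈ ps, ¬ p.1 <+: (c :: t) := fun p hp =>
        by simpa using hno p hp 0 (Nat.succ_pos m)
      rw [pvSeqHead ps hg t c h0,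
        ih t (by simpa using hm) (fun p hp q hq => by simpa using hno p hp (q + 1) (by omega))]
      simp

-- stepping over a whole token block k: k's suffixes all contain '_' and start no term
theorem pvTokStep (ps : List (List Char × List Char)) (hg : pvGood ps) :
    ∀ k X, (∀ q < k.length, ('_' ∈ k.drop q) ∧ ∀ p ∈ ps, ¬ p.1 <+: k.drop q) →
      pvSeq ps (k ++ X) = k ++ pvSeq ps X := by
  intro k
  induction k with
  | nil => intro X _; rfl
  | cons c k' ih =>
    intro X hk
    have h0 := hk 0 (Nat.succ_pos _)
    simp only [List.drop_zero] at h0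
    have hstep : ∀ p ∈ ps, ¬ p.1 <+: (c :: (k' ++ X)) := by
      intro p hp hpre
      obtain ⟨pne, pnoU, _⟩ := hg p hp
      rcases List.prefix_or_prefix_of_prefix hpre
        (List.prefix_append (c :: k') X) with h | h
      · exact h0.2 p hp h
      · exact pnoU (h.subset h0.1)
    rw [List.cons_append, pvSeqHead ps hg (k' ++ X) c hstep,
      ih X (fun q hq => by simpa using hk (q + 1) (by simp only [List.length_cons]; omega))]
    rfl

-- concrete facts about the six (term, token) pairs
theorem pvGood_pairs : pvGood pvPairs := by unfold pvGood; decide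

-- no later term's occurrence can start strictly inside an earlier-listed term's match
theorem pvNoc : ∀ i < 6, ∀ j < i, ∀ q < (pvPairs.getD i ([], [])).1.length, 0 < q →
    ((pvPairs.getD j ([], [])).1.isPrefixOf ((pvPairs.getD i ([], [])).1.drop q)) = false ∧
    (((pvPairs.getD i ([], [])).1.drop q).isPrefixOf (pvPairs.getD j ([], [])).1) = false := by
  decide

-- every token suffix contains '_' and starts no term
theorem pvTokBool : ∀ pr ∈ pvPairs, ∀ q < pr.2.length,
    ('_' ∈ pr.2.drop q) ∧ ∀ p ∈ pvPairs, (p.1.isPrefixOf (pr.2.drop q)) = false := by decide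

theorem pvTok : ∀ pr ∈ pvPairs, ∀ q < pr.2.length,
    ('_' ∈ pr.2.drop q) ∧ ∀ p ∈ pvPairs, ¬ p.1 <+: pr.2.drop q := by
  intro pr hpr q hq
  obtain ⟨h1, h2⟩ := pvTokBool pr hpr q hq
  refine ⟨h1, fun p hp hpre => ?_⟩
  have := h2 p hp
  rw [List.isPrefixOf_iff_prefix.mpr hpre] at this
  exact Bool.true_eq_false.mp this

-- fuel adequacy for the single-pass scan
theorem pvScanGo_fuel : ∀ fuel1 fuel2 l, l.length ≤ fuel1 → l.length ≤ fuel2 →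
    pvScanGo pvPairs fuel1 l = pvScanGo pvPairs fuel2 l := by
  intro fuel1
  induction fuel1 with
  | zero =>
    intro fuel2 l h1 _
    have : l = [] := List.eq_nil_of_length_eq_zero (Nat.le_zero.mp h1)
    subst this
    cases fuel2 <;> rfl
  | succ f1 ih =>
    intro fuel2 l h1 h2
    cases l with
    | nil => cases fuel2 <;> rfl
    | cons c t =>
      cases fuel2 with
      | zero => simp at h2
      | succ f2 =>
        rw [pvScanGo, pvScanGo]
        cases hF : pvPairs.find? (fun p => p.1.isPrefixOf (c :: t)) with
        | none => rw [ih f2 t (by simpa using h1) (by simpa using h2)]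
        | some pr =>
          show pr.2 ++ pvScanGo pvPairs f1 ((c :: t).drop pr.1.length) =
            pr.2 ++ pvScanGo pvPairs f2 ((c :: t).drop pr.1.length)
          have hmem : pr ∈ pvPairs := List.mem_of_find?_eq_some hF
          have hne : pr.1 ≠ [] := (pvGood_pairs pr hmem).1
          have hlen : ((c :: t).drop pr.1.length).length ≤ f1 := by
            have := List.length_drop (l := c :: t) (i := pr.1.length)
            have : 1 ≤ pr.1.length := by cases h : pr.1 with
              | nil => exact absurd h hne
              | cons a b => exact Nat.succ_le_succ (Nat.zero_le _)
            simp only [List.length_drop, List.length_cons] at *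
            omega
          have hlen2 : ((c :: t).drop pr.1.length).length ≤ f2 := by
            have : 1 ≤ pr.1.length := by cases h : pr.1 with
              | nil => exact absurd h hne
              | cons a b => exact Nat.succ_le_succ (Nat.zero_le _)
            simp only [List.length_drop, List.length_cons] at *
            omega
          rw [ih f2 _ hlen hlen2]

-- MAIN: the six sequential replaces equal the single left-to-right pass
theorem pvMain : ∀ n s, s.length = n → pvSeq pvPairs s = pvScanGo pvPairs s.length s := by
  intro n
  induction n using Nat.strong_induction_on with
  | _ n ih =>
    intro s hlen
    cases s with
    | nil => rw [pvSeq_nil]; rfl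
    | cons c t =>
      cases hF : pvPairs.find? (fun p => p.1.isPrefixOf (c :: t)) with
      | none =>
        have hno : ∀ p ∈ pvPairs, ¬ p.1 <+: (c :: t) := by
          intro p hp hpre
          have := List.find?_eq_none.mp hF p hp
          exact this (List.isPrefixOf_iff_prefix.mpr hpre)
        rw [pvSeqHead pvPairs pvGood_pairs t c hno]
        rw [ih t.length (by simp [← hlen]) t rfl]
        simp only [List.length_cons, pvScanGo, hF]
      | some pr =>
        obtain ⟨hpb, P, S, hsplit, hPfail⟩ := List.find?_eq_some_iff_append.mp hF
        have hprefix : pr.1 <+: (c :: t) := List.isPrefixOf_iff_prefix.mp hpb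
        have hmem : pr ∈ pvPairs := List.mem_of_find?_eq_some hF
        obtain ⟨hne, hnoU, _⟩ := pvGood_pairs pr hmem
        set m := pr.1.length with hm
        have hm1 : 1 ≤ m := by
          cases h : pr.1 with
          | nil => exact absurd h hne
          | cons a b => simp [hm, h]
        obtain ⟨rest, hrest⟩ := hprefix
        have hmle : m ≤ (c :: t).length := by
          rw [← hrest]; simp [hm]
        -- goodness of the sublists
        have hPmem : ∀ p ∈ P, p ∈ pvPairs := fun p hp => by
          rw [hsplit]; exact List.mem_append_left _ hp
        have hSmem : ∀ p ∈ S, p ∈ pvPairs := fun p hp => by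
          rw [hsplit]; exact List.mem_append_right _ (List.mem_cons_of_mem _ hp)
        have hgP : pvGood P := pvGood_sub hPmem pvGood_pairs
        have hgS : pvGood S := pvGood_sub hSmem pvGood_pairs
        -- no P-term matches strictly before position m
        have hPm : ∀ p ∈ P, ∀ q < m, ¬ p.1 <+: (c :: t).drop q := by
          intro p hp q hq hpre
          rcases Nat.eq_zero_or_pos q with hq0 | hq0
          · subst hq0
            simp only [List.drop_zero] at hpre
            have := hPfail p hp
            simp at this
            rw [List.isPrefixOf_iff_prefix.mpr hpre] at this
            exact Bool.true_eq_false.mp this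
          · -- q > 0: the occurrence would overlap pr.1's match at the head
            obtain ⟨j, hj, hgetP⟩ := List.getElem_of_mem hp
            have hjlt : j < P.length := hj
            have hiP : P.length < 6 := by
              have : pvPairs.length = 6 := by decide
              rw [hsplit] at this
              simp at this
              omega
            have hgetj : pvPairs.getD j ([], []) = p := by
              rw [List.getD_eq_getElem?_getD, hsplit]
              rw [List.getElem?_append_left (by omega)]
              simp [List.getElem?_eq_getElem hjlt, hgetP]
            have hgeti : pvPairs.getD P.length ([], []) = pr := by
              rw [List.getD_eq_getElem?_getD, hsplit]
              rw [List.getElem?_append_right (le_refl _)]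
              simp
            have hnoc := pvNoc P.length hiP j (by omega) q (by rw [hgeti]; omega) hq0
            rw [hgetj, hgeti] at hnoc
            rw [← hrest, List.drop_append_of_le_length (by omega)] at hpre
            rcases List.prefix_or_prefix_of_prefix hpre
              (List.prefix_append (pr.1.drop q) rest) with h | h
            · rw [List.isPrefixOf_iff_prefix.mpr h] at hnoc
              exact Bool.true_eq_false.mp hnoc.1
            · rw [List.isPrefixOf_iff_prefix.mpr h] at hnoc
              exact Bool.true_eq_false.mp hnoc.2
        -- assemble
        have e1 : pvSeq pvPairs (c :: t) = pvSeq S (pvScan1 pr.1 pr.2 (pvSeq P (c :: t))) := by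
          rw [hsplit, pvSeq_append, pvSeq_cons]
        have e2 : pvSeq P (c :: t) = pr.1 ++ pvSeq P ((c :: t).drop m) := by
          rw [pvSplitSeq P hgP m (c :: t) hmle hPm]
          congr 1
          rw [← hrest, hm, List.take_left]
        have e3 : pvScan1 pr.1 pr.2 (pr.1 ++ pvSeq P ((c :: t).drop m)) =
            pr.2 ++ pvScan1 pr.1 pr.2 (pvSeq P ((c :: t).drop m)) := by
          rw [pvScan1_pos pr.1 pr.2 _ hne (List.prefix_append _ _), ← hm, List.drop_left]
        have e4 : pvSeq S (pr.2 ++ pvScan1 pr.1 pr.2 (pvSeq P ((c :: t).drop m))) =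
            pr.2 ++ pvSeq S (pvScan1 pr.1 pr.2 (pvSeq P ((c :: t).drop m))) := by
          refine pvTokStep S hgS pr.2 _ ?_
          intro q hq
          obtain ⟨h1, h2⟩ := pvTok pr hmem q hq
          exact ⟨h1, fun p hp => h2 p (hSmem p hp)⟩
        have e5 : pvSeq S (pvScan1 pr.1 pr.2 (pvSeq P ((c :: t).drop m))) =
            pvSeq pvPairs ((c :: t).drop m) := by
          rw [hsplit, pvSeq_append, pvSeq_cons]
        have e6 : pvSeq pvPairs ((c :: t).drop m) =
            pvScanGo pvPairs ((c :: t).drop m).length ((c :: t).drop m) := by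
          refine ih ((c :: t).drop m).length ?_ _ rfl
          simp only [List.length_drop, List.length_cons, ← hlen]
          omega
        rw [e1, e2, e3, e4, e5, e6]
        -- right-hand side
        have : pvScanGo pvPairs (c :: t).length (c :: t) =
            pr.2 ++ pvScanGo pvPairs t.length ((c :: t).drop m) := by
          simp only [List.length_cons, pvScanGo, hF]
          rw [← hm]
        rw [this, pvScanGo_fuel ((c :: t).drop m).length t.length _ (le_refl _)
          (by simp only [List.length_drop, List.length_cons]; omega)]

-- lift pvMain through the six concrete String.replace layers
theorem pvChain (s : List Char) :
    (PySem.Chars.replace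
      (PySem.Chars.replace
        (PySem.Chars.replace
          (PySem.Chars.replace
            (PySem.Chars.replace
              (PySem.Chars.replace s "Locaa AI".toList "__TERM_0__".toList)
              "YouTube".toList "__TERM_1__".toList)
            "Instagram".toList "__TERM_2__".toList)
          "TikTok".toList "__TERM_3__".toList)
        "Reels".toList "__TERM_4__".toList)
      "Shorts".toList "__TERM_5__".toList) = pvScanGo pvPairs s.length s := by
  rw [pvReplace_eq_scan1 _ _ _ (by decide), pvReplace_eq_scan1 _ _ _ (by decide),
    pvReplace_eq_scan1 _ _ _ (by decide), pvReplace_eq_scan1 _ _ _ (by decide),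
    pvReplace_eq_scan1 _ _ _ (by decide), pvReplace_eq_scan1 _ _ _ (by decide)]
  have : pvSeq pvPairs s = pvScanGo pvPairs s.length s := pvMain s.length s rfl
  rw [← this]
  rfl

-- ===== VERDICT (by name: the statement is the Claim_ definition above) =====
theorem protect_terms_py_spec : Claim_equal_protect_terms_py := by
  intro text _
  unfold Spec_protect_terms_py protect_terms_py protect_terms_py_alt
  have henum : PySem.List.enumerate pvProtectedTerms =
      [((0 : Int), "Locaa AI"), (1, "YouTube"), (2, "Instagram"),
       (3, "TikTok"), (4, "Reels"), (5, "Shorts")] := by decide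
  rw [henum]
  simp only [List.foldl, List.map]
  rw [show ("__TERM_" ++ PySem.Int.toStr 0 ++ "__") = "__TERM_0__" from by decide,
    show ("__TERM_" ++ PySem.Int.toStr 1 ++ "__") = "__TERM_1__" from by decide,
    show ("__TERM_" ++ PySem.Int.toStr 2 ++ "__") = "__TERM_2__" from by decide,
    show ("__TERM_" ++ PySem.Int.toStr 3 ++ "__") = "__TERM_3__" from by decide,
    show ("__TERM_" ++ PySem.Int.toStr 4 ++ "__") = "__TERM_4__" from by decide,
    show ("__TERM_" ++ PySem.Int.toStr 5 ++ "__") = "__TERM_5__" from by decide]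
  simp only [Prod.mk.injEq]
  refine ⟨?_, by decide⟩
  simp only [PySem.Str.replace, String.toList_ofList]
  exact congrArg String.ofList (pvChain text.toList)
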